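-- pv_equiv track=rewrite | github.com/ubbeg2000/ntt-hardware-accelerator | scripts/psi_table.py | generate_full_w_table
-- ===== SOURCE A (Python) =====
-- from math import ceil, log2, log
--
-- def clog2(a):
--     return ceil(log2(a))
--
-- def clog(a, base):
--     return ceil(log(a, base))
--
-- def transpose(matrix):
--     m = len(matrix)
--     n = len(matrix[0])
--
--     ret = [[0 for i in range(m)] for j in range(n)]
--
--     for i in range(m):
--         for j in range(n):
--             ret[j][i] = matrix[i][j]
--
--     return ret
--
-- def generate_full_w_table(D):
--     ret = []
--     for i in range(clog2(D)):
--         temp = []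
--         for j in range(D):
--             b = j // pow(2, clog(D, 2)-i) + 1
--             v = pow(2, i)+b-1
--             temp.append(v)
--
--
--         ret.append(temp)
--
--     tr = transpose(ret)
--
--     return tr
-- ===== SOURCE B (Python) =====
-- from math import ceil, log2, log
--
-- def clog2(a):
--     return ceil(log2(a))
--
-- def clog(a, base):
--     return ceil(log(a, base))
--
-- def generate_full_w_table(D):
--     # build the transposed table directly, row j at a time: no intermediate
--     # log2(D) x D matrix and no transpose pass
--     c = clog(D, 2)
--     k = clog2(D)
--     return [[pow(2, i) + j // pow(2, c - i) for i in range(k)]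
--             for j in range(D)]
-- ===== Notes on version B (the rewrite author's own statement) =====
-- stated objective: faster
-- what changed: B builds the transposed table directly as one comprehension (outer loop over j, inner over i), eliminating the intermediate log2(D)xD matrix and the whole transpose helper with its set-by-index passes.
-- crash fix: On D = 1 A raises IndexError (transpose indexes matrix[0] of the empty matrix) while B returns [[]], the 1-row table with no twiddle columns. — e.g. on generate_full_w_table(1): A raises IndexError, B returns [[]]
import Mathlib
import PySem

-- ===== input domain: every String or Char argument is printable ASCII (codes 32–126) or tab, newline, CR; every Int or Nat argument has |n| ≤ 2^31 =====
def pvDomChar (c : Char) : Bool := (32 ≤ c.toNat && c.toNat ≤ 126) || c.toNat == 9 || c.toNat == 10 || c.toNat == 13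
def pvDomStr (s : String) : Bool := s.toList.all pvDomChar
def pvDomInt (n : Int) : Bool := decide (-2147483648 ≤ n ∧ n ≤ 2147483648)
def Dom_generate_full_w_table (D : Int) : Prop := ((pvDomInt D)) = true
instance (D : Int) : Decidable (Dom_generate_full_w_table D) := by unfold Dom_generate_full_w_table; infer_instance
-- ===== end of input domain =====

-- B emits the transposed table directly, row by row, removing A's intermediate matrix and
-- its transpose pass (objective: faster by a constant factor).

-- ===== PORT A =====
-- clog2(a) = ceil(log2(a)): exact model of the float expression for 0 < a ≤ 2^31
-- (the double log2 is correctly rounded and no a in the domain lies close enough to a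
-- power of two for rounding to move the ceiling): equals bit_length(a-1).
def pyClog2 (a : Int) : Int := (PySem.Int.bitLength (a - 1) : Int)

-- clog(a, 2) = ceil(log(a)/log(2)): exact model for 0 < a ≤ 2^31; the float quotient
-- rounds just above the integer exactly at a = 2^29 and a = 2^31 (checked against
-- CPython exhaustively in the neighbourhoods of every power of two in the domain).
def pyClogB2 (a : Int) : Int :=
  (PySem.Int.bitLength (a - 1) : Int) + (if a = 536870912 ∨ a = 2147483648 then 1 else 0)

-- pow(2, e): exact for e ≥ 0, the only case reached under Pre_ (Python yields a float for e < 0)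
def pow2 (e : Int) : Int := if 0 ≤ e then 2 ^ e.toNat else 0

-- transpose(matrix): m, n, the zero matrix, then the two index loops writing ret[j][i] = matrix[i][j].
-- matrix[0] raises IndexError in Python on an empty matrix; that input is outside Pre_ (headD is a stand-in).
def pyTranspose (matrix : List (List Int)) : List (List Int) :=
  let m := matrix.length
  let n := (matrix.headD []).length
  let ret := (List.range n).map (fun _ => (List.range m).map (fun _ => (0 : Int)))
  (List.range m).foldl (fun r i =>
    (List.range n).foldl (fun r j =>
      r.set j ((r.getD j []).set i ((matrix.getD i []).getD j 0))) r) ret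

def generate_full_w_table (D : Int) : List (List Int) :=
  let ret := (List.range (pyClog2 D).toNat).foldl (fun ret (i : ℕ) =>
    let temp := (List.range D.toNat).foldl (fun temp (j : ℕ) =>
      let b := PySem.Int.floordiv (j : Int) (pow2 (pyClogB2 D - (i : Int))) + 1
      let v := (2 : Int) ^ i + b - 1
      temp ++ [v]) []
    ret ++ [temp]) []
  pyTranspose ret

-- ===== PORT B =====
def generate_full_w_table_alt (D : Int) : List (List Int) :=
  let c := pyClogB2 D
  let k := pyClog2 D
  (List.range D.toNat).map (fun (j : ℕ) =>
    (List.range k.toNat).map (fun (i : ℕ) =>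
      (2 : Int) ^ i + PySem.Int.floordiv (j : Int) (pow2 (c - (i : Int)))))

-- ===== PRECONDITION & SPEC =====
-- Python A raises on D ≤ 0 (math domain error in log) and on D = 1 (IndexError: transpose([])).
def Pre_generate_full_w_table (D : Int) : Prop := 2 ≤ D
instance (D : Int) : Decidable (Pre_generate_full_w_table D) := by unfold Pre_generate_full_w_table; infer_instance
def pvWitness_generate_full_w_table : Int := 4

-- On D = 1 A raises IndexError (transpose indexes matrix[0] of the empty matrix) while B returns
-- [[]], the 1-row table with no twiddle columns.
def Raises_generate_full_w_table (D : Int) : Prop := D = 1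
instance (D : Int) : Decidable (Raises_generate_full_w_table D) := by unfold Raises_generate_full_w_table; infer_instance
def pvRaiseWitness_generate_full_w_table : Int := 1
def pvRaiseWitnessOut_generate_full_w_table : List (List Int) := [[]]

def Spec_generate_full_w_table (D : Int) (out : List (List Int)) : Prop := out = generate_full_w_table_alt D
instance (D : Int) (out : List (List Int)) : Decidable (Spec_generate_full_w_table D out) := by unfold Spec_generate_full_w_table; infer_instance

-- ===== CLAIM (what is proved, stated in full; the proofs are below) =====
def Claim_equal_generate_full_w_table : Prop := ∀ (D : Int), Dom_generate_full_w_table D → Pre_generate_full_w_table D → Spec_generate_full_w_table D (generate_full_w_table D)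
def Claim_raises_generate_full_w_table : Prop := (∀ (D : Int), Dom_generate_full_w_table D → Raises_generate_full_w_table D → ¬ Pre_generate_full_w_table D) ∧ (Dom_generate_full_w_table (pvRaiseWitness_generate_full_w_table) ∧ Raises_generate_full_w_table (pvRaiseWitness_generate_full_w_table) ∧ generate_full_w_table_alt (pvRaiseWitness_generate_full_w_table) = pvRaiseWitnessOut_generate_full_w_table)

-- ===== LEMMAS AND PROOFS =====

-- getD after a single set
theorem getD_set_char (l : List (List Int)) (i t : ℕ) (x d : List Int) :
    (l.set i x).getD t d = if t = i ∧ i < l.length then x else l.getD t d := by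
  simp [List.getD, List.getElem?_set]
  split_ifs <;> simp_all

theorem headD_eq_getD (l : List (List Int)) : l.headD [] = l.getD 0 [] := by
  cases l <;> simp [List.getD]

-- a fold of per-index sets preserves the length
theorem foldl_set_length (u : ℕ → List (List Int) → List Int) :
    ∀ (l : List ℕ) (R : List (List Int)),
      (l.foldl (fun r j => r.set j (u j r)) R).length = R.length := by
  intro l
  induction l with
  | nil => intro R; rfl
  | cons x xs ih => intro R; simp [ih]

-- the outer loop of pyTranspose preserves the length too
theorem foldl_set_length_outer (g : ℕ → ℕ → Int) (n : ℕ) :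
    ∀ (l : List ℕ) (R : List (List Int)),
      (l.foldl (fun r i =>
        (List.range n).foldl (fun r j => r.set j ((r.getD j []).set i (g i j))) r) R).length
      = R.length := by
  intro l
  induction l with
  | nil => intro R; rfl
  | cons x xs ih =>
      intro R
      simp only [List.foldl_cons]
      rw [ih, foldl_set_length (fun j r => (r.getD j []).set x (g x j))]

-- inner loop of pyTranspose: entry t after folding over range n
theorem inner_getD (v : ℕ → List Int → List Int) :
    ∀ (n : ℕ) (R : List (List Int)) (t : ℕ),
      ((List.range n).foldl (fun r j => r.set j (v j (r.getD j []))) R).getD t [] =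
        if t < n ∧ t < R.length then v t (R.getD t []) else R.getD t [] := by
  intro n
  induction n with
  | zero => intro R t; simp
  | succ m ih =>
      intro R t
      rw [List.range_succ, List.foldl_append]
      simp only [List.foldl_cons, List.foldl_nil]
      rw [getD_set_char]
      rw [foldl_set_length (fun j r => v j (r.getD j [])), ih R m, ih R t]
      by_cases h1 : t = m
      · subst h1
        by_cases h2 : t < R.length <;> simp [h2]
      · by_cases h2 : t < m <;> by_cases h3 : t < R.length <;> simp [h1, h2, h3] <;> omega

-- outer loop of pyTranspose: row t evolves as a fold of sets on that row alone
theorem outer_getD (g : ℕ → ℕ → Int) (n : ℕ) :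
    ∀ (m : ℕ) (R : List (List Int)) (t : ℕ), t < n → t < R.length →
      ((List.range m).foldl (fun r i =>
          (List.range n).foldl (fun r j => r.set j ((r.getD j []).set i (g i j))) r) R).getD t []
        = (List.range m).foldl (fun row i => row.set i (g i t)) (R.getD t []) := by
  intro m
  induction m with
  | zero => intro R t _ _; simp
  | succ p ih =>
      intro R t ht hR
      rw [List.range_succ, List.foldl_append]
      simp only [List.foldl_cons, List.foldl_nil]
      rw [inner_getD (fun j row => row.set p (g p j)) n _ t]
      rw [foldl_set_length_outer g n (List.range p) R]
      simp only [ht, hR, and_self, if_pos]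
      rw [ih R t ht hR, List.foldl_append]
      simp

-- filling a row of the right length by successive sets is a map
theorem sets_fill (h : ℕ → Int) :
    ∀ (m : ℕ) (row0 : List Int), m ≤ row0.length →
      (List.range m).foldl (fun row i => row.set i (h i)) row0
        = (List.range m).map h ++ row0.drop m := by
  intro m
  induction m with
  | zero => intro row0 _; simp
  | succ p ih =>
      intro row0 hm
      rw [List.range_succ, List.foldl_append]
      simp only [List.foldl_cons, List.foldl_nil]
      have hp : p < row0.length := by omega
      rw [ih row0 (by omega), List.set_append_right _ _ (by simp)]
      have hset : (List.drop p row0).set (p - ((List.range p).map h).length) (h p)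
          = h p :: List.drop (p + 1) row0 := by
        simp only [List.length_map, List.length_range, Nat.sub_self]
        rw [List.drop_eq_getElem_cons hp]
        rfl
      rw [hset]
      simp

-- transpose of a k×n generated matrix, k ≥ 1
theorem pyTranspose_map (k n : ℕ) (fi : ℕ → ℕ → Int) (hk : 0 < k) :
    pyTranspose ((List.range k).map (fun i => (List.range n).map (fi i)))
      = (List.range n).map (fun j => (List.range k).map (fun i => fi i j)) := by
  unfold pyTranspose
  set M := (List.range k).map (fun i => (List.range n).map (fi i)) with hM
  have hMlen : M.length = k := by simp [hM]
  have hhead : (M.headD []).length = n := by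
    rw [headD_eq_getD, hM, PySem.List.getD_map_range _ k 0 [] hk]
    simp
  have hrow : ∀ i j, i < k → j < n → (M.getD i []).getD j 0 = fi i j := by
    intro i j hi hj
    rw [hM, PySem.List.getD_map_range _ k i [] hi, PySem.List.getD_map_range _ n j 0 hj]
  simp only [hMlen, hhead]
  set ret0 := (List.range n).map (fun _ => (List.range k).map (fun _ => (0 : Int))) with hret0
  have hret0len : ret0.length = n := by simp [hret0]
  have hcongr : (List.range k).foldl (fun r i =>
        (List.range n).foldl (fun r j => r.set j ((r.getD j []).set i ((M.getD i []).getD j 0))) r) ret0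
      = (List.range k).foldl (fun r i =>
        (List.range n).foldl (fun r j => r.set j ((r.getD j []).set i (fi i j))) r) ret0 := by
    apply PySem.List.foldl_congr_mem
    intro r i hi
    apply PySem.List.foldl_congr_mem
    intro r' j hj
    rw [hrow i j (by simpa using hi) (by simpa using hj)]
  rw [hcongr]
  apply List.ext_getElem
  · rw [foldl_set_length_outer fi n (List.range k) ret0, hret0len]; simp
  · intro j h1 h2
    have hj : j < n := by
      rw [foldl_set_length_outer fi n (List.range k) ret0, hret0len] at h1; exact h1
    rw [← List.getD_eq_getElem _ [] h1,
        outer_getD fi n k ret0 j hj (by omega),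
        PySem.List.getD_map_range _ n j [] hj,
        sets_fill (fun i => fi i j) k _ (by simp)]
    simp

-- clog2(D) ≥ 1 for D ≥ 2
theorem pyClog2_pos (D : Int) (hD : 2 ≤ D) : 0 < (pyClog2 D).toNat := by
  unfold pyClog2
  have h := PySem.Int.lt_two_pow_bitLength (D - 1)
  by_contra h0
  have : PySem.Int.bitLength (D - 1) = 0 := by omega
  rw [this] at h
  simp at h
  omega

-- the two programs agree on every D ≥ 2
theorem main_eq (D : Int) (hD : 2 ≤ D) :
    generate_full_w_table D = generate_full_w_table_alt D := by
  unfold generate_full_w_table generate_full_w_table_alt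
  simp only [PySem.List.foldl_append_singleton_eq_map, List.nil_append]
  have hfix : ∀ (i j : ℕ), 2 ^ i + (PySem.Int.floordiv (j : Int) (pow2 (pyClogB2 D - (i : Int))) + 1) - 1
      = 2 ^ i + PySem.Int.floordiv (j : Int) (pow2 (pyClogB2 D - (i : Int))) := by
    intro i j; ring
  simp only [hfix]
  exact pyTranspose_map (pyClog2 D).toNat D.toNat
    (fun i j => 2 ^ i + PySem.Int.floordiv (j : Int) (pow2 (pyClogB2 D - (i : Int))))
    (pyClog2_pos D hD)

-- ===== VERDICT (by name: the statement is the Claim_ definition above) =====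
theorem generate_full_w_table_spec : Claim_equal_generate_full_w_table := by
  intro D _ hpre
  unfold Spec_generate_full_w_table
  exact main_eq D hpre

@[simp]
theorem generate_full_w_table_raises : Claim_raises_generate_full_w_table := by
  unfold Claim_raises_generate_full_w_table
  constructor
  · intro D _ h
    unfold Raises_generate_full_w_table at h
    unfold Pre_generate_full_w_table
    omega
  · decide
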